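-- pv_equiv track=rewrite | github.com/yaronlev9/Intro2cs-course | ex2/wave_editor.py | slowdown_audio
-- ===== SOURCE A (Python) =====
-- def average(x, y, z=0, divider=2):
--     """returns the average value of up to 3 numbers"""
--     return int((x+y+z)/divider)
--
-- def make_avg_list(list):
--     """creates a list of the average values of each speaker"""
--     avg_list=[[] for k in range (len(list)-1)]
--     for i in range(len(list)):
--         for k in range (len(list[0])):
--             if(i<len(list)-1):
--                 avg_list[i].append(average(list[i][k], list[i + 1][k]))
--     return avg_list
--
-- def slowdown_audio(audiofile):
--     """creates a new list of original values and average values in between"""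
--     avg_audio=make_avg_list(audiofile)
--     slow_audio=[]
--     for i in range(len(audiofile)*2-1):
--         for k in audiofile:
--             if(i%2==0 ):
--                 slow_audio.append(audiofile[i//2])
--                 break
--             else:
--                 slow_audio.append(avg_audio[i//2])
--                 break
--     return slow_audio
-- ===== SOURCE B (Python) =====
-- def average(x, y, z=0, divider=2):
--     """returns the average value of up to 3 numbers"""
--     return int((x+y+z)/divider)
--
-- def slowdown_audio(audiofile):
--     """creates a new list of original values and average values in between"""
--     if not audiofile:
--         return []
--     width = len(audiofile[0])
--     slow_audio = []
--     for cur, nxt in zip(audiofile, audiofile[1:]):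
--         slow_audio.append(cur)
--         slow_audio.append([average(cur[k], nxt[k]) for k in range(width)])
--     slow_audio.append(audiofile[-1])
--     return slow_audio
-- ===== Notes on version B (the rewrite author's own statement) =====
-- stated objective: simpler
-- what changed: B replaces A's two-phase scheme (a precomputed average table built by index mutation, then an interleave loop driven by i//2 parity with a dummy inner for/break) by one streaming pass over consecutive frame pairs that emits each frame and its averaged in-between row directly, appending the last frame at the end.
import Mathlib
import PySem

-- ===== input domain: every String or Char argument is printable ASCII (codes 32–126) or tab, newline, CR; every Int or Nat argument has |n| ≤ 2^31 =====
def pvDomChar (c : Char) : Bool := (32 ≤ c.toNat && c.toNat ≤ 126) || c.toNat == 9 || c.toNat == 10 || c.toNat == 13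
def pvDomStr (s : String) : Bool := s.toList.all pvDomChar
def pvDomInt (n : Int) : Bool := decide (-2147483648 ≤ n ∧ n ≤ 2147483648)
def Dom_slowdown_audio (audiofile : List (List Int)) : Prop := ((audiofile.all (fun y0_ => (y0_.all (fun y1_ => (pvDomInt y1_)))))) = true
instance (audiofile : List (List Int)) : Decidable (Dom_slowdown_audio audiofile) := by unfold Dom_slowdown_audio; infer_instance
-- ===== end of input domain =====

-- B fuses A's two phases (precomputed average table + index-interleave loop) into one
-- streaming pass over consecutive frame pairs; objective: simpler, same asymptotic cost.


-- ===== PORT A =====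
-- average: int((x+y+z)/divider); on Dom (|values| ≤ 2^31) the float division is exact
-- and int() truncates toward zero, which is PySem.Int.truncdiv.
def pvAverage (x y z divider : Int) : Int := PySem.Int.truncdiv (x + y + z) divider

def pvMakeAvgList (l : List (List Int)) : List (List Int) :=
  (PySem.List.pyRange 0 (l.length : Int) 1).foldl (fun avg i =>
    (PySem.List.pyRange 0 ((PySem.List.pyGetD l 0 []).length : Int) 1).foldl (fun avg k =>
      if i < (l.length : Int) - 1 then
        avg.modify i.toNat (fun row =>
          row ++ [pvAverage (PySem.List.pyGetD (PySem.List.pyGetD l i []) k 0)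
                            (PySem.List.pyGetD (PySem.List.pyGetD l (i + 1) []) k 0) 0 2])
      else avg) avg)
    (List.replicate ((l.length : Int) - 1).toNat ([] : List Int))

def slowdown_audio (audiofile : List (List Int)) : List (List Int) :=
  let avg_audio := pvMakeAvgList audiofile
  (PySem.List.pyRange 0 ((audiofile.length : Int) * 2 - 1) 1).foldl (fun slow i =>
    -- "for k in audiofile: …; break" runs the body once iff audiofile is non-empty
    match audiofile with
    | [] => slow
    | _ :: _ =>
      if PySem.Int.mod i 2 = 0 then
        slow ++ [PySem.List.pyGetD audiofile (PySem.Int.floordiv i 2) []]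
      else
        slow ++ [PySem.List.pyGetD avg_audio (PySem.Int.floordiv i 2) []]) []

-- ===== PORT B =====
def pvAvgRow (w : Nat) (cur nxt : List Int) : List Int :=
  (List.range w).map (fun (k : Nat) =>
    pvAverage (PySem.List.pyGetD cur (k : Int) 0) (PySem.List.pyGetD nxt (k : Int) 0) 0 2)

-- the zip-over-consecutive-pairs loop of Source B, with audiofile[-1] appended at the end
def pvGo (w : Nat) : List (List Int) → List (List Int)
  | [] => []
  | [x] => [x]
  | cur :: nxt :: rest => cur :: pvAvgRow w cur nxt :: pvGo w (nxt :: rest)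

def slowdown_audio_alt (audiofile : List (List Int)) : List (List Int) :=
  match audiofile with
  | [] => []
  | f :: _ => pvGo f.length audiofile

-- ===== PRECONDITION & SPEC =====
-- Pre_ excludes ragged inputs whose first frame is longer than some later frame:
-- there Python A raises IndexError (audiofile[i][k] for k < len(audiofile[0])), and B raises too.
def Pre_slowdown_audio (audiofile : List (List Int)) : Prop :=
  ∀ f ∈ audiofile, (audiofile.headD []).length ≤ f.length
instance (audiofile : List (List Int)) : Decidable (Pre_slowdown_audio audiofile) := by
  unfold Pre_slowdown_audio; infer_instance
def pvWitness_slowdown_audio : List (List Int) := [[1, 2], [3, 4], [5, -6]]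
def Spec_slowdown_audio (audiofile : List (List Int)) (out : List (List Int)) : Prop := out = slowdown_audio_alt audiofile
instance (audiofile : List (List Int)) (out : List (List Int)) : Decidable (Spec_slowdown_audio audiofile out) := by unfold Spec_slowdown_audio; infer_instance

-- ===== CLAIM (what is proved, stated in full; the proofs are below) =====
def Claim_equal_slowdown_audio : Prop := ∀ (audiofile : List (List Int)), Dom_slowdown_audio audiofile → Pre_slowdown_audio audiofile → Spec_slowdown_audio audiofile (slowdown_audio audiofile)

-- ===== LEMMAS AND PROOFS =====

-- the average row A's table holds at position i (all indexing via getD, A's pyGetD after cast)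
def pvRowOf (w : Nat) (l : List (List Int)) (i : Nat) : List Int :=
  (List.range w).map (fun k =>
    pvAverage ((l.getD i []).getD k 0) ((l.getD (i + 1) []).getD k 0) 0 2)

theorem modify_modify {α : Type} (l : List α) (i : Nat) (f g : α → α) :
    (l.modify i f).modify i g = l.modify i (fun x => g (f x)) := by
  induction l generalizing i with
  | nil => simp
  | cons x xs ih =>
    cases i with
    | zero => simp [List.modify]
    | succ j => simp [List.modify]; exact ih j

theorem modify_append_cons {α : Type} (xs : List α) (y : α) (ys : List α) (f : α → α) :
    (xs ++ y :: ys).modify xs.length f = xs ++ f y :: ys := by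
  induction xs with
  | nil => simp [List.modify]
  | cons a as ih => simpa [List.modify] using ih

theorem foldl_const {α β : Type} (l : List β) (a : α) :
    l.foldl (fun a _ => a) a = a := by
  induction l generalizing a with
  | nil => rfl
  | cons x xs ih => simpa using ih a

theorem inner_fold (w : Nat) (idx : Nat) (g : Nat → Int) (a : List (List Int)) :
    (List.range w).foldl (fun a k => a.modify idx (fun row => row ++ [g k])) a
      = a.modify idx (fun row => row ++ (List.range w).map g) := by
  induction w generalizing a with
  | zero =>
    apply List.ext_getElem
    · simp
    · intro j h1 h2
      simp [List.getElem_modify]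
  | succ m ih =>
    rw [List.range_succ, List.foldl_append]
    simp only [List.foldl_cons, List.foldl_nil, ih, modify_modify]
    exact congrArg (a.modify idx) (funext fun row => by simp)

theorem make_avg_list_eq (l : List (List Int)) :
    pvMakeAvgList l
      = (List.range (l.length - 1)).map (pvRowOf (l.headD []).length l) := by
  unfold pvMakeAvgList
  rcases Nat.eq_zero_or_pos l.length with h0 | hpos
  · have h1 : PySem.List.pyRange 0 (l.length : Int) 1 = [] :=
      PySem.List.pyRange_one_eq_nil (by omega)
    rw [h1]
    simp [h0]
  · -- split the outer loop: i = 0 .. n-2 build the table, the last step i = n-1 is the identity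
    have hn : (l.length : Int) = ((l.length - 1 : Nat) : Int) + 1 := by omega
    have hw : PySem.List.pyGetD l 0 [] = l.headD [] := by
      cases l with
      | nil => simp at hpos
      | cons x xs => simp [PySem.List.pyGetD_zero_cons]
    set n1 := l.length - 1 with hn1
    set w := (l.headD []).length with hwdef
    -- rewrite ranges to Nat ranges
    have hrange : PySem.List.pyRange 0 (l.length : Int) 1
        = (List.range l.length).map (fun (k : Nat) => (k : Int)) := PySem.List.pyRange_zero_nat _
    have hrangew : PySem.List.pyRange 0 (w : Int) 1
        = (List.range w).map (fun (k : Nat) => (k : Int)) := PySem.List.pyRange_zero_nat _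
    rw [hw, hrange, hrangew, List.foldl_map]
    have hcast : ((l.length : Int) - 1).toNat = n1 := by omega
    rw [hcast]
    -- the body for a given outer index i (a Nat)
    have hbody : ∀ (i : Nat) (a : List (List Int)),
        (List.map (fun (k : Nat) => (k : Int)) (List.range w)).foldl (fun avg (kk : Int) =>
          if (i : Int) < (l.length : Int) - 1 then
            avg.modify (i : Int).toNat (fun row =>
              row ++ [pvAverage (PySem.List.pyGetD (PySem.List.pyGetD l (i : Int) []) kk 0)
                                (PySem.List.pyGetD (PySem.List.pyGetD l ((i : Int) + 1) []) kk 0) 0 2])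
          else avg) a
        = if i < n1 then a.modify i (fun row => row ++ pvRowOf w l i) else a := by
      intro i a
      rw [List.foldl_map]
      by_cases hi : i < n1
      · rw [if_pos hi]
        have hlt : (i : Int) < (l.length : Int) - 1 := by omega
        simp only [if_pos hlt, Int.toNat_natCast]
        have := inner_fold w i (fun k =>
          pvAverage ((l.getD i []).getD k 0) ((l.getD (i + 1) []).getD k 0) 0 2) a
        rw [show ((i : Int) + 1) = ((i + 1 : Nat) : Int) by push_cast; ring]
        simp only [PySem.List.pyGetD_natCast]
        exact this
      · rw [if_neg hi]
        have hlt : ¬ ((i : Int) < (l.length : Int) - 1) := by omega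
        simp only [if_neg hlt]
        exact foldl_const _ _
    -- now fold over List.range l.length = range n1 ++ [n1]
    have hsplit : List.range l.length = List.range n1 ++ [n1] := by
      have : l.length = n1 + 1 := by omega
      rw [this, List.range_succ]
    rw [hsplit, List.foldl_append]
    -- invariant over the first n1 steps
    have hinv : ∀ (m : Nat), m ≤ n1 →
        (List.range m).foldl (fun (a : List (List Int)) (i : Nat) =>
          (List.map (fun (k : Nat) => (k : Int)) (List.range w)).foldl (fun (avg : List (List Int)) (kk : Int) =>
            if (i : Int) < (l.length : Int) - 1 then
              avg.modify (i : Int).toNat (fun row =>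
                row ++ [pvAverage (PySem.List.pyGetD (PySem.List.pyGetD l (i : Int) []) kk 0)
                                  (PySem.List.pyGetD (PySem.List.pyGetD l ((i : Int) + 1) []) kk 0) 0 2])
            else avg) a)
          (List.replicate n1 ([] : List Int))
        = (List.range m).map (pvRowOf w l) ++ List.replicate (n1 - m) ([] : List Int) := by
      intro m
      induction m with
      | zero => intro _; simp
      | succ m ihm =>
        intro hm
        rw [List.range_succ, List.foldl_append, ihm (by omega)]
        simp only [List.foldl_cons, List.foldl_nil]
        rw [hbody]
        rw [if_pos (by omega)]
        have hrep : List.replicate (n1 - m) ([] : List Int)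
            = ([] : List Int) :: List.replicate (n1 - (m + 1)) ([] : List Int) := by
          rw [show n1 - m = (n1 - (m + 1)) + 1 by omega, List.replicate_succ]
        rw [hrep]
        have hmod := modify_append_cons (List.map (pvRowOf w l) (List.range m))
          ([] : List Int) (List.replicate (n1 - (m + 1)) ([] : List Int))
          (fun row => row ++ pvRowOf w l m)
        rw [List.length_map, List.length_range] at hmod
        rw [hmod]
        simp [List.range_succ]
    rw [hinv n1 (le_refl _)]
    simp only [List.foldl_cons, List.foldl_nil]
    rw [hbody]
    simp [Nat.lt_irrefl]

-- A's main loop, written as a map over the flat index range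
theorem slowdown_eq_map (l : List (List Int)) (x : List Int) (xs : List (List Int))
    (hl : l = x :: xs) :
    slowdown_audio l
      = (List.range (2 * l.length - 1)).map (fun k =>
          if k % 2 = 0 then l.getD (k / 2) []
          else pvRowOf (l.headD []).length l (k / 2)) := by
  subst hl
  simp only [slowdown_audio]
  have hr : PySem.List.pyRange 0 (((x :: xs).length : Int) * 2 - 1) 1
      = (List.range (2 * (x :: xs).length - 1)).map (fun (k : Nat) => (k : Int)) := by
    have : (((x :: xs).length : Int) * 2 - 1) = ((2 * (x :: xs).length - 1 : Nat) : Int) := by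
      simp; omega
    rw [this]
    exact PySem.List.pyRange_zero_nat _
  rw [hr, List.foldl_map]
  have hpush : ∀ (acc : List (List Int)) (y : Nat),
      (if PySem.Int.mod (y : Int) 2 = 0 then
        acc ++ [PySem.List.pyGetD (x :: xs) (PySem.Int.floordiv (y : Int) 2) []]
      else acc ++ [PySem.List.pyGetD (pvMakeAvgList (x :: xs)) (PySem.Int.floordiv (y : Int) 2) []])
      = acc ++ [if PySem.Int.mod (y : Int) 2 = 0 then
          PySem.List.pyGetD (x :: xs) (PySem.Int.floordiv (y : Int) 2) []
        else PySem.List.pyGetD (pvMakeAvgList (x :: xs)) (PySem.Int.floordiv (y : Int) 2) []] := by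
    intro acc y; split_ifs <;> rfl
  simp only [hpush]
  rw [PySem.List.foldl_append_singleton_eq_map, List.nil_append]
  apply List.map_congr_left
  intro k hk
  rw [List.mem_range] at hk
  have hmod : PySem.Int.mod (k : Int) 2 = ((k % 2 : Nat) : Int) := PySem.Int.mod_natCast k 2
  have hdiv : PySem.Int.floordiv (k : Int) 2 = ((k / 2 : Nat) : Int) := PySem.Int.floordiv_natCast k 2
  by_cases he : k % 2 = 0
  · rw [if_pos he]
    simp only [hmod, he, if_pos]
    rw [hdiv, PySem.List.pyGetD_natCast]
    simp
  · rw [if_neg he]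
    have : ¬ (((k % 2 : Nat) : Int) = 0) := by omega
    simp only [hmod, if_neg this]
    rw [hdiv, PySem.List.pyGetD_natCast, make_avg_list_eq]
    have hklt : k / 2 < (x :: xs).length - 1 := by omega
    exact PySem.List.getD_map_range _ _ _ _ hklt

-- pvRowOf at in-range positions is pvAvgRow of the actual consecutive elements
theorem rowOf_cons (w : Nat) (cur nxt : List Int) (rest : List (List Int)) :
    pvRowOf w (cur :: nxt :: rest) 0 = pvAvgRow w cur nxt := by
  unfold pvRowOf pvAvgRow
  apply List.map_congr_left
  intro k _
  simp

theorem rowOf_tail (w : Nat) (a : List Int) (l : List (List Int)) (i : Nat) :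
    pvRowOf w (a :: l) (i + 1) = pvRowOf w l i := by
  unfold pvRowOf
  simp

-- the interleaved map over the flat index range IS the pair-walking loop of B
theorem map_eq_go (w : Nat) : ∀ (xs : List (List Int)) (x : List Int),
    (List.range (2 * (x :: xs).length - 1)).map (fun k =>
        if k % 2 = 0 then (x :: xs).getD (k / 2) []
        else pvRowOf w (x :: xs) (k / 2))
      = pvGo w (x :: xs) := by
  intro xs
  induction xs with
  | nil =>
    intro x
    simp [pvGo, List.range_succ]
  | cons y rest ih =>
    intro x
    have hlen : 2 * (x :: y :: rest).length - 1 = (2 * (y :: rest).length - 1) + 1 + 1 := by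
      simp; omega
    rw [hlen]
    simp only [List.range_succ_eq_map, List.map_cons, List.map_map]
    unfold pvGo
    refine congrArg₂ List.cons ?_ (congrArg₂ List.cons ?_ ?_)
    · norm_num
    · norm_num
      exact rowOf_cons w x y rest
    · rw [← ih y]
      apply List.map_congr_left
      intro k hk
      simp only [Function.comp, Nat.succ_eq_add_one]
      have hmod : (k + 1 + 1) % 2 = k % 2 := by omega
      have hdiv : (k + 1 + 1) / 2 = k / 2 + 1 := by omega
      rw [hmod, hdiv]
      by_cases he : k % 2 = 0
      · simp [he]
      · rw [if_neg he, if_neg he, rowOf_tail]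

theorem slowdown_eq_alt (l : List (List Int)) : slowdown_audio l = slowdown_audio_alt l := by
  cases l with
  | nil =>
    unfold slowdown_audio slowdown_audio_alt
    rw [PySem.List.pyRange_one_eq_nil (by simp)]
    rfl
  | cons x xs =>
    rw [slowdown_eq_map (x :: xs) x xs rfl]
    unfold slowdown_audio_alt
    simpa using map_eq_go x.length xs x

-- ===== VERDICT (by name: the statement is the Claim_ definition above) =====
theorem slowdown_audio_spec : Claim_equal_slowdown_audio := by
  intro audiofile _ _
  unfold Spec_slowdown_audio
  exact slowdown_eq_alt audiofile
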